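-- pv_equiv track=rewrite | github.com/botij0/katas | python/aoc2024/05_print-queue/part_2.py | get_incorrect_updates
-- ===== SOURCE A (Python) =====
-- def get_incorrect_updates(updates: list, rules_dict: dict) -> list:
--     incorrect_updates = []
--     for update in updates:
--         is_invalid = False
--         update = update.split(",")
--         for i in range(1, len(update)):
--             if update[i] not in rules_dict:
--                 continue
--             else:
--                 for j in range(0, i):
--                     if update[j] in rules_dict[update[i]]:
--                         is_invalid = True
--                         incorrect_updates.append(update)
--                         break
--                 if is_invalid:
--                     break
--
--     return incorrect_updates
-- ===== SOURCE B (Python) =====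
-- def get_incorrect_updates(updates: list, rules_dict: dict) -> list:
--     incorrect_updates = []
--     for update in updates:
--         pages = update.split(",")
--         seen = set()
--         for page in pages:
--             preds = rules_dict.get(page)
--             if preds is not None and seen & set(preds):
--                 incorrect_updates.append(pages)
--                 break
--             seen.add(page)
--     return incorrect_updates
-- ===== Notes on version B (the rewrite author's own statement) =====
-- stated objective: simpler
-- what changed: Replaces A's nested index loops (for each position i, rescan all earlier positions j) with a single left-to-right pass per update that maintains a running `seen` set and tests it against rules_dict[page] by set intersection.
import Mathlib
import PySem

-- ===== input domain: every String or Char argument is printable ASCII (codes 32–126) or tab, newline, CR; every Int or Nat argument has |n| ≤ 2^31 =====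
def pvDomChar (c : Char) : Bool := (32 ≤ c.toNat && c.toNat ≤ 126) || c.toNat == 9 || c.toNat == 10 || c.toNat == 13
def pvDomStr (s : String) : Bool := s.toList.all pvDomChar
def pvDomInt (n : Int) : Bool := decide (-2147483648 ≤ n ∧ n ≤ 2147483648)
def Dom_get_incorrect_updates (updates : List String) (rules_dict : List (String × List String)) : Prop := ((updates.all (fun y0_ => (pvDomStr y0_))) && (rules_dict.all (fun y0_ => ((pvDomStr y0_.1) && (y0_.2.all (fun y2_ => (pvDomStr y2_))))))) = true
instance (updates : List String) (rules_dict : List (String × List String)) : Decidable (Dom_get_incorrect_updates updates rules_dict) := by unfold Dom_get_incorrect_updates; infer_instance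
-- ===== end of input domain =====

-- B replaces A's nested index loops (for each i, rescan all j < i) by one left-to-right pass
-- per update keeping a running `seen` set; objective: simpler (single pass, no index arithmetic).

-- ===== PORT A =====
-- inner 'for j in range(0, i): if update[j] in rules_dict[update[i]]: …break'
def pvAInnerJ (pages preds : List String) (i j : Nat) : Bool :=
  if _h : j < i then
    match PySem.List.pyGet? pages (j : Int) with
    | some p => if preds.contains p then true else pvAInnerJ pages preds i (j + 1)
    | none => false
  else false
termination_by i - j

-- outer 'for i in range(1, len(update))' with the is_invalid flag / break
def pvALoopI (pages : List String) (rules_dict : List (String × List String)) (i : Nat) : Bool :=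
  if _h : i < pages.length then
    match PySem.List.pyGet? pages (i : Int) with
    | none => false
    | some p =>
      match (PySem.Dict.mk rules_dict).get? p with
      | none => pvALoopI pages rules_dict (i + 1)          -- 'continue'
      | some preds =>
        if pvAInnerJ pages preds i 0 then true            -- append + break
        else pvALoopI pages rules_dict (i + 1)
  else false
termination_by pages.length - i

def get_incorrect_updates (updates : List String) (rules_dict : List (String × List String)) : List (List String) :=
  updates.foldl (fun incorrect_updates update =>
    let pages := (PySem.Str.split? update ",").getD []
    if pvALoopI pages rules_dict 1 then incorrect_updates ++ [pages] else incorrect_updates) []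

-- ===== PORT B =====
-- 'for page in pages: preds = rules_dict.get(page); if preds is not None and seen & set(preds): …break; seen.add(page)'
def pvBScan (pages : List String) (rules_dict : List (String × List String)) (seen : PySem.Set String) : Bool :=
  match pages with
  | [] => false
  | page :: rest =>
    match (PySem.Dict.mk rules_dict).get? page with
    | some preds =>
      if !(PySem.Set.inter seen (PySem.Set.ofList preds)).isEmpty then true
      else pvBScan rest rules_dict (PySem.Set.add seen page)
    | none => pvBScan rest rules_dict (PySem.Set.add seen page)

def get_incorrect_updates_alt (updates : List String) (rules_dict : List (String × List String)) : List (List String) :=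
  updates.foldl (fun incorrect_updates update =>
    let pages := (PySem.Str.split? update ",").getD []
    if pvBScan pages rules_dict PySem.Set.empty then incorrect_updates ++ [pages] else incorrect_updates) []

-- ===== PRECONDITION & SPEC =====
def Spec_get_incorrect_updates (updates : List String) (rules_dict : List (String × List String)) (out : List (List String)) : Prop := out = get_incorrect_updates_alt updates rules_dict
instance (updates : List String) (rules_dict : List (String × List String)) (out : List (List String)) : Decidable (Spec_get_incorrect_updates updates rules_dict out) := by unfold Spec_get_incorrect_updates; infer_instance

-- ===== CLAIM (what is proved, stated in full; the proofs are below) =====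
def Claim_equal_get_incorrect_updates : Prop := ∀ (updates : List String) (rules_dict : List (String × List String)), Dom_get_incorrect_updates updates rules_dict → Spec_get_incorrect_updates updates rules_dict (get_incorrect_updates updates rules_dict)

-- ===== LEMMAS AND PROOFS =====

-- A's inner j-loop scans exactly the prefix pages[j:i]
lemma pvAInnerJ_eq_any (pages preds : List String) (i : Nat) (hi : i ≤ pages.length) :
    ∀ n j, i - j = n →
      pvAInnerJ pages preds i j = ((pages.drop j).take (i - j)).any (fun q => preds.contains q) := by
  intro n
  induction n with
  | zero =>
    intro j hj
    have hni : ¬ j < i := by omega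
    unfold pvAInnerJ
    simp [hni, hj]
  | succ n ih =>
    intro j hj
    have hji : j < i := by omega
    have hjl : j < pages.length := lt_of_lt_of_le hji hi
    unfold pvAInnerJ
    rw [dif_pos hji, PySem.List.pyGet?_natCast, List.getElem?_eq_getElem hjl]
    have hij : i - j = (i - (j + 1)) + 1 := by omega
    rw [List.drop_eq_getElem_cons hjl, hij, List.take_succ_cons, List.any_cons,
        ih (j + 1) (by omega)]
    cases h : preds.contains pages[j] <;>
      simp only [h, if_true, if_false, Bool.true_or, Bool.false_or, Bool.false_eq_true]

-- main invariant: at position i, A's remaining scan equals B's remaining scan when `seen`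
-- holds exactly the members of the prefix pages.take i
lemma pvLoop_eq (pages : List String) (rules_dict : List (String × List String)) :
    ∀ n i (seen : PySem.Set String), pages.length - i = n → i ≤ pages.length →
      (∀ x, x ∈ seen ↔ x ∈ pages.take i) →
      pvALoopI pages rules_dict i = pvBScan (pages.drop i) rules_dict seen := by
  intro n
  induction n with
  | zero =>
    intro i seen hn hi _
    have : i = pages.length := by omega
    subst this
    unfold pvALoopI
    simp [pvBScan]
  | succ n ih =>
    intro i seen hn hi hseen
    have hlt : i < pages.length := by omega
    have hdrop : pages.drop i = pages[i] :: pages.drop (i + 1) := List.drop_eq_getElem_cons hlt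
    have htake : ∀ x, x ∈ seen.add pages[i] ↔ x ∈ pages.take (i + 1) := by
      intro x
      rw [PySem.Set.mem_add, hseen, List.take_add_one, List.getElem?_eq_getElem hlt]
      simp only [List.mem_append, Option.toList_some, List.mem_singleton]
    unfold pvALoopI
    rw [dif_pos hlt, PySem.List.pyGet?_natCast, List.getElem?_eq_getElem hlt, hdrop]
    simp only [pvBScan]
    cases hget : (PySem.Dict.mk rules_dict).get? pages[i] with
    | none => exact ih (i + 1) (seen.add pages[i]) (by omega) (by omega) htake
    | some preds =>
      have htest : pvAInnerJ pages preds i 0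
          = !(PySem.Set.inter seen (PySem.Set.ofList preds)).isEmpty := by
        rw [pvAInnerJ_eq_any pages preds i (le_of_lt hlt) (i - 0) 0 rfl]
        rw [Bool.eq_iff_iff]
        simp only [List.drop_zero, Nat.sub_zero, List.any_eq_true, Bool.not_eq_true',
          List.isEmpty_eq_false_iff_exists_mem]
        constructor
        · rintro ⟨q, hq, hmem⟩
          exact ⟨q, (PySem.Set.mem_inter _ _ _).mpr
            ⟨(hseen q).mpr hq, (PySem.Set.mem_ofList _ _).mpr (by simpa using hmem)⟩⟩
        · rintro ⟨q, hq⟩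
          obtain ⟨h1, h2⟩ := (PySem.Set.mem_inter _ _ _).mp hq
          exact ⟨q, (hseen q).mp h1, by simpa using (PySem.Set.mem_ofList _ _).mp h2⟩
      dsimp only
      rw [htest]
      cases hb : (!(PySem.Set.inter seen (PySem.Set.ofList preds)).isEmpty) with
      | true => simp
      | false =>
        simp only [Bool.false_eq_true, if_false]
        exact ih (i + 1) (seen.add pages[i]) (by omega) (by omega) htake

-- per update: A's indexed scan from i = 1 equals B's one pass with an empty seen set
lemma pvPer_update (pages : List String) (rules_dict : List (String × List String)) :
    pvALoopI pages rules_dict 1 = pvBScan pages rules_dict PySem.Set.empty := by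
  cases pages with
  | nil =>
    unfold pvALoopI
    simp [pvBScan]
  | cons p rest =>
    have hB : pvBScan (p :: rest) rules_dict PySem.Set.empty
        = pvBScan rest rules_dict (PySem.Set.add PySem.Set.empty p) := by
      simp only [pvBScan]
      cases hget : (PySem.Dict.mk rules_dict).get? p with
      | none => rfl
      | some preds =>
        simp [show PySem.Set.inter ([] : List String) (PySem.Set.ofList preds) = []
          from rfl]
    rw [hB]
    refine pvLoop_eq (p :: rest) rules_dict ((p :: rest).length - 1) 1
      (PySem.Set.add PySem.Set.empty p) rfl (by simp) ?_
    intro x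
    rw [PySem.Set.mem_add]
    simp [PySem.Set.empty]

-- ===== VERDICT (by name: the statement is the Claim_ definition above) =====
theorem get_incorrect_updates_spec : Claim_equal_get_incorrect_updates := by
  intro updates rules_dict _
  unfold Spec_get_incorrect_updates get_incorrect_updates get_incorrect_updates_alt
  refine PySem.List.foldl_congr_mem _ _ _ _ ?_
  intro acc u _
  dsimp only
  rw [pvPer_update]
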